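-- pv_equiv track=rewrite | github.com/tamnd/python-one | scripts/make-docs/preprocess.py | _eat_braced_args
-- ===== SOURCE A (Python) =====
-- def _eat_braced_args(text: str, start: int, max_args: int) -> int:
--     """Return the position after eating up to max_args braced args from text[start:]."""
--     pos = start
--     n = len(text)
--     for _ in range(max_args):
--         # skip whitespace and optional [...]
--         while pos < n and text[pos] in ' \t\n':
--             pos += 1
--         if pos < n and text[pos] == '[':
--             pos += 1
--             while pos < n and text[pos] != ']':
--                 pos += 1
--             pos += 1  # skip ']'
--             continue
--         if pos >= n or text[pos] != '{':
--             break
--         pos += 1  # skip opening '{'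
--         depth = 1
--         while pos < n and depth:
--             if text[pos] == '{':
--                 depth += 1
--             elif text[pos] == '}':
--                 depth -= 1
--             pos += 1
--     return pos
-- ===== SOURCE B (Python) =====
-- def _eat_braced_args(text: str, start: int, max_args: int) -> int:
--     """Return the position after eating up to max_args braced args from text[start:].
--
--     Flat single-loop state machine: state 0 = between args, state -1 = inside
--     an optional [...], state k > 0 = inside braces at nesting depth k.
--     """
--     n = len(text)
--     pos = start
--     remaining = max_args
--     state = 0
--     while remaining > 0:
--         if state > 0:
--             if pos >= n:
--                 break
--             c = text[pos]
--             if c == '{':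
--                 state += 1
--             elif c == '}':
--                 if state == 1:
--                     remaining -= 1
--                     state = 0
--                 else:
--                     state -= 1
--             pos += 1
--         elif state == -1:
--             if pos < n and text[pos] != ']':
--                 pos += 1
--             else:
--                 pos += 1  # past ']' (or one past the end when unclosed)
--                 state = 0
--                 remaining -= 1
--         else:
--             if pos >= n:
--                 break
--             c = text[pos]
--             if c in ' \t\n':
--                 pos += 1
--             elif c == '[':
--                 state = -1
--                 pos += 1
--             elif c == '{':
--                 state = 1
--                 pos += 1
--             else:
--                 break
--     return pos
-- ===== Notes on version B (the rewrite author's own statement) =====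
-- stated objective: alternative
-- what changed: Replaced A's nested loops (outer for over max_args with three inner while-loops and an integer depth counter) by one flat state-machine loop over an explicit state (between-args / inside-[...] / brace depth) and a remaining-args counter.
import Mathlib
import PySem

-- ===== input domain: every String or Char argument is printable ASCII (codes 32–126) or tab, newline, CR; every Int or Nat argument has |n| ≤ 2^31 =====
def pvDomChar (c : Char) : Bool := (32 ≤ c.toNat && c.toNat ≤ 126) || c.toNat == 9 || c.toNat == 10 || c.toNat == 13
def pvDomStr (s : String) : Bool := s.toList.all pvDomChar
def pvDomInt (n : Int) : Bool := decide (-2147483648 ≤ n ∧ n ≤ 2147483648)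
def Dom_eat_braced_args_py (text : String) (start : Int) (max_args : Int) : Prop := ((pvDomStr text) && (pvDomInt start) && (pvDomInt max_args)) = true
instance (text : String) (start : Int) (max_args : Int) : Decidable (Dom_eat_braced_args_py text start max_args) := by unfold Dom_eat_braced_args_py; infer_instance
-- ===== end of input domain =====

-- B rewrites A's nested loops as one flat state-machine loop (objective: alternative, same cost).

-- ===== PORT A =====

-- small hand-written termination lemmas (cited by the ports' decreasing_by)
theorem pv_measure_dec (n pos : Int) (h : pos < n) : (n - (pos + 1)).toNat < (n - pos).toNat :=
  (Int.toNat_lt_toNat (Int.sub_pos.mpr h)).mpr (sub_lt_sub_left (lt_add_one pos) n)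
theorem pv_count_dec (r : Int) (hr : 0 < r) : (r - 1).toNat < r.toNat :=
  (Int.toNat_lt_toNat hr).mpr (sub_one_lt r)

def pvWsChar (c : Char) : Bool := c == ' ' || c == '\t' || c == '\n'

-- text[pos]: Python indexing with negative wraparound; the NUL default stands for the
-- out-of-range access on which Python raises IndexError (excluded by Pre_).
def pvChr (t : List Char) (pos : Int) : Char := (PySem.List.pyGet? t pos).getD (Char.ofNat 0)

-- while pos < n and text[pos] in ' \t\n': pos += 1
def pvA_ws (t : List Char) (n pos : Int) : Int :=
  if h : pos < n ∧ pvWsChar (pvChr t pos) then pvA_ws t n (pos + 1) else pos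
termination_by (n - pos).toNat
decreasing_by obtain ⟨h1, _⟩ := h; exact pv_measure_dec n pos h1

-- while pos < n and text[pos] != ']': pos += 1
def pvA_brk (t : List Char) (n pos : Int) : Int :=
  if h : pos < n ∧ pvChr t pos ≠ ']' then pvA_brk t n (pos + 1) else pos
termination_by (n - pos).toNat
decreasing_by obtain ⟨h1, _⟩ := h; exact pv_measure_dec n pos h1

-- while pos < n and depth: update depth; pos += 1
def pvA_brace (t : List Char) (n pos depth : Int) : Int :=
  if h : pos < n ∧ depth ≠ 0 then
    pvA_brace t n (pos + 1)
      (if pvChr t pos = '{' then depth + 1 else if pvChr t pos = '}' then depth - 1 else depth)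
  else pos
termination_by (n - pos).toNat
decreasing_by obtain ⟨h1, _⟩ := h; exact pv_measure_dec n pos h1

-- for _ in range(max_args): …
def pvA_loop (t : List Char) (n : Int) : Nat → Int → Int
  | 0, pos => pos
  | f + 1, pos =>
    let p := pvA_ws t n pos
    if p < n ∧ pvChr t p = '[' then
      pvA_loop t n f (pvA_brk t n (p + 1) + 1)
    else if ¬ p < n ∨ pvChr t p ≠ '{' then p
    else pvA_loop t n f (pvA_brace t n (p + 1) 1)

def eat_braced_args_py (text : String) (start : Int) (max_args : Int) : Int :=
  pvA_loop text.toList (text.toList.length : Int) max_args.toNat start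

-- ===== PORT B =====

-- flat state machine: state 0 = between args, state -1 = inside [...], state k > 0 = brace depth k
def pvB_loop (t : List Char) (n pos remaining state : Int) : Int :=
  if hr : 0 < remaining then
    if 0 < state then
      if hp : pos < n then
        if pvChr t pos = '{' then pvB_loop t n (pos + 1) remaining (state + 1)
        else if pvChr t pos = '}' then
          if state = 1 then pvB_loop t n (pos + 1) (remaining - 1) 0
          else pvB_loop t n (pos + 1) remaining (state - 1)
        else pvB_loop t n (pos + 1) remaining state
      else pos
    else if state = -1 then
      if hp : pos < n ∧ pvChr t pos ≠ ']' then
        pvB_loop t n (pos + 1) remaining (-1)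
      else pvB_loop t n (pos + 1) (remaining - 1) 0
    else
      if hp : pos < n then
        if pvWsChar (pvChr t pos) then pvB_loop t n (pos + 1) remaining 0
        else if pvChr t pos = '[' then pvB_loop t n (pos + 1) remaining (-1)
        else if pvChr t pos = '{' then pvB_loop t n (pos + 1) remaining 1
        else pos
      else pos
  else pos
termination_by remaining.toNat + (n + 1 - pos).toNat
decreasing_by
  all_goals first
    | exact Nat.add_lt_add_left (pv_measure_dec (n + 1) pos (hp.trans (lt_add_one n))) remaining.toNat
    | exact Nat.add_lt_add_left (pv_measure_dec (n + 1) pos (hp.1.trans (lt_add_one n))) remaining.toNat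
    | exact add_lt_add_of_lt_of_le (pv_count_dec remaining hr)
        (Int.toNat_le_toNat (sub_le_sub_left (lt_add_one pos).le (n + 1)))

def eat_braced_args_py_alt (text : String) (start : Int) (max_args : Int) : Int :=
  pvB_loop text.toList (text.toList.length : Int) start max_args 0

-- ===== PRECONDITION & SPEC =====
-- Pre_ excludes exactly the inputs on which Python A raises IndexError: a first index
-- below -len(text) is accessed iff max_args > 0 and start < -len(text).
def Pre_eat_braced_args_py (text : String) (start : Int) (max_args : Int) : Prop :=
  max_args ≤ 0 ∨ -(text.toList.length : Int) ≤ start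
instance (text : String) (start : Int) (max_args : Int) : Decidable (Pre_eat_braced_args_py text start max_args) := by unfold Pre_eat_braced_args_py; infer_instance

def pvWitness_eat_braced_args_py : String × Int × Int := ("{a} {b}", 0, 2)

def Spec_eat_braced_args_py (text : String) (start : Int) (max_args : Int) (out : Int) : Prop := out = eat_braced_args_py_alt text start max_args
instance (text : String) (start : Int) (max_args : Int) (out : Int) : Decidable (Spec_eat_braced_args_py text start max_args out) := by unfold Spec_eat_braced_args_py; infer_instance

-- ===== CLAIM (what is proved, stated in full; the proofs are below) =====
def Claim_equal_eat_braced_args_py : Prop := ∀ (text : String) (start : Int) (max_args : Int), Dom_eat_braced_args_py text start max_args → Pre_eat_braced_args_py text start max_args → Spec_eat_braced_args_py text start max_args (eat_braced_args_py text start max_args)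

-- ===== LEMMAS AND PROOFS =====

-- the whitespace scan stops at a non-whitespace position
theorem pvA_ws_fix (t : List Char) (n pos : Int) :
    ¬ (pvA_ws t n pos < n ∧ pvWsChar (pvChr t (pvA_ws t n pos))) := by
  induction pos using pvA_ws.induct (t := t) (n := n) with
  | case1 pos h ih => rw [pvA_ws, dif_pos h]; exact ih
  | case2 pos h => rw [pvA_ws, dif_neg h]; exact h

-- B in state 0 runs A's whitespace loop
theorem pvB_ws (t : List Char) (n pos r : Int) (hr : 0 < r) :
    pvB_loop t n pos r 0 = pvB_loop t n (pvA_ws t n pos) r 0 := by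
  induction pos using pvA_ws.induct (t := t) (n := n) with
  | case1 pos h ih =>
      rw [pvA_ws, dif_pos h, ← ih]
      conv_lhs => rw [pvB_loop]
      simp [hr, h.1, h.2]
  | case2 pos h => rw [pvA_ws, dif_neg h]

-- B in state -1 runs A's bracket loop, then closes the arg slot
theorem pvB_brk (t : List Char) (n pos r : Int) (hr : 0 < r) :
    pvB_loop t n pos r (-1) = pvB_loop t n (pvA_brk t n pos + 1) (r - 1) 0 := by
  induction pos using pvA_brk.induct (t := t) (n := n) with
  | case1 pos h ih =>
      rw [pvA_brk, dif_pos h]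
      conv_lhs => rw [pvB_loop]
      simp only [hr, if_pos, dif_pos h]
      simp
      exact ih
  | case2 pos h =>
      rw [pvA_brk, dif_neg h]
      conv_lhs => rw [pvB_loop]
      simp [hr, h]

-- B at n ≤ pos in state 0 stops
theorem pvB_stop (t : List Char) (n pos r : Int) (h : ¬ pos < n) :
    pvB_loop t n pos r 0 = pos := by
  rw [pvB_loop]
  by_cases hr : 0 < r
  · simp [hr, h]
  · simp [hr]

-- B in a positive state runs A's brace loop, then closes the arg slot
theorem pvB_brace (t : List Char) (n pos d r : Int) (hr : 0 < r) (hd : 0 < d) :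
    pvB_loop t n pos r d = pvB_loop t n (pvA_brace t n pos d) (r - 1) 0 := by
  induction pos, d using pvA_brace.induct (t := t) (n := n) with
  | case1 pos d h ih =>
      rw [pvA_brace, dif_pos h]
      conv_lhs => rw [pvB_loop]
      by_cases hob : pvChr t pos = '{'
      · simp [hob] at ih
        simp [hr, hd, h.1, hob]
        exact ih (by omega)
      · by_cases hcb : pvChr t pos = '}'
        · by_cases hone : d = 1
          · subst hone
            simp [hr, h.1, hcb]
            rw [pvA_brace]
            simp
          · simp [hcb] at ih
            simp [hr, hd, h.1, hcb, hone]
            exact ih (by omega)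
        · simp [hob, hcb] at ih
          simp [hr, hd, h.1, hob, hcb]
          exact ih hd
  | case2 pos d h =>
      rw [pvA_brace, dif_neg h]
      have hp : ¬ pos < n := by
        intro hlt; exact h ⟨hlt, by omega⟩
      conv_lhs => rw [pvB_loop]
      simp [hr, hd, hp]
      rw [pvB_stop t n pos (r - 1) hp]

-- main simulation: A's fueled outer loop equals B's flat loop in state 0
theorem pvAB (t : List Char) (n : Int) (f : Nat) (pos : Int) :
    pvA_loop t n f pos = pvB_loop t n pos (f : Int) 0 := by
  induction f generalizing pos with
  | zero =>
      rw [pvA_loop, pvB_loop]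
      simp
  | succ f ih =>
      have hf1 : (0 : Int) < (f : Int) + 1 := by positivity
      have hcast : ((f + 1 : Nat) : Int) = (f : Int) + 1 := by push_cast; ring
      rw [pvA_loop, hcast, pvB_ws t n pos _ hf1]
      set p := pvA_ws t n pos with hpdef
      have hfix := pvA_ws_fix t n pos
      rw [← hpdef] at hfix
      by_cases hlt : p < n
      · have hws : ¬ pvWsChar (pvChr t p) := fun hw => hfix ⟨hlt, hw⟩
        by_cases hbr : pvChr t p = '['
        · rw [if_pos (show p < n ∧ pvChr t p = '[' from ⟨hlt, hbr⟩)]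
          conv_rhs => rw [pvB_loop]
          simp [hf1, hlt, hbr, pvWsChar]
          rw [pvB_brk t n (p + 1) _ hf1, ih]
          norm_num
        · by_cases hbc : pvChr t p = '{'
          · rw [if_neg (show ¬ (p < n ∧ pvChr t p = '[') from fun hx => hbr hx.2),
              if_neg (show ¬ (¬ p < n ∨ pvChr t p ≠ '{') by simp [hlt, hbc])]
            conv_rhs => rw [pvB_loop]
            simp [hf1, hlt, hbc, pvWsChar]
            rw [pvB_brace t n (p + 1) 1 _ hf1 (by norm_num), ih]
            norm_num
          · rw [if_neg (show ¬ (p < n ∧ pvChr t p = '[') from fun hx => hbr hx.2),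
              if_pos (show ¬ p < n ∨ pvChr t p ≠ '{' from Or.inr hbc)]
            conv_rhs => rw [pvB_loop]
            simp [hf1, hlt, hws, hbr, hbc]
      · rw [if_neg (show ¬ (p < n ∧ pvChr t p = '[') from fun hx => hlt hx.1),
          if_pos (show ¬ p < n ∨ pvChr t p ≠ '{' from Or.inl hlt)]
        rw [pvB_stop t n p _ hlt]

-- ===== VERDICT (by name: the statement is the Claim_ definition above) =====
theorem eat_braced_args_py_spec : Claim_equal_eat_braced_args_py := by
  intro text start max_args _ _
  unfold Spec_eat_braced_args_py eat_braced_args_py eat_braced_args_py_alt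
  by_cases hm : 0 ≤ max_args
  · rw [pvAB, Int.toNat_of_nonneg hm]
  · have h0 : max_args.toNat = 0 := by omega
    have hneg : ¬ (0 : Int) < max_args := by omega
    rw [h0, pvA_loop, pvB_loop]
    simp [hneg]
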